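-- pv_equiv track=rewrite | github.com/ayushmishra90/Demo-Repo | DSA college questions/ASSG2_122CS0072_AYUSH/ASSG2_122CS0072_AYUSH_5.py | find_longest_subsequence
-- ===== SOURCE A (Python) =====
-- def find_longest_subsequence(word, word_set):
--     longest_subsequence = ""
--
--     def is_subsequence(subsequence, string):
--         i = 0
--         for char in string:
--             if i < len(subsequence) and char == subsequence[i]:
--                 i += 1
--         return i == len(subsequence)
--
--     for subsequence in word_set:
--         if is_subsequence(subsequence, word) and len(subsequence) > len(longest_subsequence):
--             longest_subsequence = subsequence
--
--     return longest_subsequence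
-- ===== SOURCE B (Python) =====
-- def find_longest_subsequence(word, word_set):
--     # Precompute, for each character of word, the ascending list of indices where it appears.
--     positions = {}
--     for idx, ch in enumerate(word):
--         positions[ch] = positions.get(ch, []) + [idx]
--
--     def matches(cand):
--         # cursor-based test: for each char, binary-search its index list for the
--         # smallest index strictly greater than the cursor
--         cur = -1
--         for ch in cand:
--             lst = positions.get(ch, [])
--             lo, hi = 0, len(lst)
--             while lo < hi:
--                 mid = (lo + hi) // 2
--                 if lst[mid] > cur:
--                     hi = mid
--                 else:
--                     lo = mid + 1
--             if lo == len(lst):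
--                 return False
--             cur = lst[lo]
--         return True
--
--     best = ""
--     for cand in word_set:
--         if matches(cand) and len(cand) > len(best):
--             best = cand
--     return best
-- ===== Notes on version B (the rewrite author's own statement) =====
-- stated objective: faster
-- what changed: A's per-candidate two-pointer scan over the whole word is replaced by precomputing a dict mapping each character of word to its ascending index list and testing each candidate with a cursor advanced by hand-written binary search (smallest stored index strictly greater than the cursor); the selection loop is unchanged.
import Mathlib
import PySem

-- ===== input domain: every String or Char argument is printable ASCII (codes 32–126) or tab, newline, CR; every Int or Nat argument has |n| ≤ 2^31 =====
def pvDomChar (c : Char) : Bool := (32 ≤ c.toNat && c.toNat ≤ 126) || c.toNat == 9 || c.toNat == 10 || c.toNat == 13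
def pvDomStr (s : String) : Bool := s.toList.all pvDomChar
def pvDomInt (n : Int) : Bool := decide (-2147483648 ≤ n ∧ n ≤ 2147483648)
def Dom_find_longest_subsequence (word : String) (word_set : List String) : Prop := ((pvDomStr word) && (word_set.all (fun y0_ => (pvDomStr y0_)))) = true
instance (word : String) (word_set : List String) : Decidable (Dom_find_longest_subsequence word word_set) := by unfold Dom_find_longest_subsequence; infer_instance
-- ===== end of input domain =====

-- B replaces A's per-candidate two-pointer scan by a precomputed char → ascending-index-list
-- dict and a cursor advanced by binary search; selection loop unchanged (objective: faster; measured).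

-- ===== PORT A =====
-- A's inner helper is_subsequence(subsequence, string): counter i advanced while scanning `string`
def pvIsSubseqA (subsequence string : List Char) : Bool :=
  let i : Int := string.foldl
    (fun i ch =>
      if i < PySem.List.len subsequence ∧ PySem.List.pyGet? subsequence i = some ch then i + 1
      else i) 0
  i == PySem.List.len subsequence

def find_longest_subsequence (word : String) (word_set : List String) : String :=
  word_set.foldl
    (fun longest_subsequence subsequence =>
      if pvIsSubseqA subsequence.toList word.toList = true ∧
          PySem.Str.len longest_subsequence < PySem.Str.len subsequence then subsequence
      else longest_subsequence) ""

-- ===== PORT B =====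
-- positions = {}; for idx, ch in enumerate(word): positions[ch] = positions.get(ch, []) + [idx]
def pvBuildPos (w : List Char) : PySem.Dict Char (List Int) :=
  (PySem.List.enumerate w).foldl
    (fun d p => d.modify p.2 [] (fun l => l ++ [p.1])) PySem.Dict.empty

-- the hand-written while loop: lo, hi = 0, len(lst); while lo < hi: …
-- lst[mid] is always in range when called with hi ≤ len lst; getD 0 is exact there
def pvBisect (lst : List Int) (cur : Int) (lo hi : Nat) : Nat :=
  if lo < hi then
    let mid := (lo + hi) / 2
    if cur < lst.getD mid 0 then pvBisect lst cur lo mid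
    else pvBisect lst cur (mid + 1) hi
  else lo
termination_by hi - lo
decreasing_by all_goals omega

-- matches(cand): cursor loop with early `return False`
def pvMatchesB (pos : PySem.Dict Char (List Int)) : List Char → Int → Bool
  | [], _ => true
  | ch :: rest, cur =>
    let lst := pos.getD ch []
    let lo := pvBisect lst cur 0 lst.length
    if lo = lst.length then false
    else pvMatchesB pos rest (lst.getD lo 0)

def find_longest_subsequence_alt (word : String) (word_set : List String) : String :=
  let pos := pvBuildPos word.toList
  word_set.foldl
    (fun best cand =>
      if pvMatchesB pos cand.toList (-1) = true ∧
          PySem.Str.len best < PySem.Str.len cand then cand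
      else best) ""

-- ===== PRECONDITION & SPEC =====
def Spec_find_longest_subsequence (word : String) (word_set : List String) (out : String) : Prop := out = find_longest_subsequence_alt word word_set
instance (word : String) (word_set : List String) (out : String) : Decidable (Spec_find_longest_subsequence word word_set out) := by unfold Spec_find_longest_subsequence; infer_instance

-- ===== CLAIM (what is proved, stated in full; the proofs are below) =====
def Claim_equal_find_longest_subsequence : Prop := ∀ (word : String) (word_set : List String), Dom_find_longest_subsequence word word_set → Spec_find_longest_subsequence word word_set (find_longest_subsequence word word_set)

-- ===== LEMMAS AND PROOFS =====

-- ---- A side: the counter fold reaches len(sub) iff sub is a subsequence ----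

theorem pv_ne_head_sublist {a b : Char} {t w : List Char} (h : a ≠ b) :
    (a :: t).Sublist (b :: w) ↔ (a :: t).Sublist w := by
  constructor
  · intro hs
    cases hs with
    | cons _ h' => exact h'
    | cons₂ _ h' => exact absurd rfl h
  · exact fun hs => hs.cons b

theorem pvFoldA_iff (w : List Char) : ∀ (s : List Char) (i : Nat), i ≤ s.length →
    (w.foldl
      (fun i ch =>
        if i < PySem.List.len s ∧ PySem.List.pyGet? s i = some ch then i + 1 else i)
      (i : Int) = PySem.List.len s ↔ (s.drop i).Sublist w) := by
  induction w with
  | nil =>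
    intro s i hi
    simp [PySem.List.len_eq, List.drop_eq_nil_iff]
    omega
  | cons ch w' ih =>
    intro s i hi
    by_cases hlt : i < s.length
    · by_cases hch : s[i] = ch
      · have hcond : (i : Int) < PySem.List.len s ∧ PySem.List.pyGet? s (i : Int) = some ch := by
          constructor
          · simp [PySem.List.len_eq]; omega
          · simp [PySem.List.pyGet?_natCast, List.getElem?_eq_getElem hlt, hch]
        have hdrop : s.drop i = ch :: s.drop (i + 1) := by
          rw [List.drop_eq_getElem_cons hlt, hch]
        have : ((i : Int) + 1) = ((i + 1 : Nat) : Int) := by push_cast; ring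
        simp only [List.foldl_cons, hcond, and_self, if_pos, this]
        rw [ih s (i + 1) (by omega), hdrop, List.cons_sublist_cons]
      · have hcond : ¬ ((i : Int) < PySem.List.len s ∧ PySem.List.pyGet? s (i : Int) = some ch) := by
          rintro ⟨-, h2⟩
          rw [PySem.List.pyGet?_natCast, List.getElem?_eq_getElem hlt] at h2
          exact hch (Option.some_inj.mp h2)
        have hdrop : s.drop i = s[i] :: s.drop (i + 1) := List.drop_eq_getElem_cons hlt
        have hne : s[i] ≠ ch := hch
        simp only [List.foldl_cons, hcond, if_neg, not_false_iff]
        rw [ih s i (by omega), hdrop, pv_ne_head_sublist hne, ← hdrop]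
    · have hie : i = s.length := by omega
      have hcond : ¬ ((i : Int) < PySem.List.len s ∧ PySem.List.pyGet? s (i : Int) = some ch) := by
        rintro ⟨h1, -⟩
        rw [PySem.List.len_eq] at h1
        omega
      have hdrop : s.drop i = [] := by simp [hie]
      simp only [List.foldl_cons, hcond, if_neg, not_false_iff]
      rw [ih s i hi, hdrop]
      simp

theorem pvIsSubseqA_iff (s w : List Char) :
    pvIsSubseqA s w = true ↔ s.Sublist w := by
  unfold pvIsSubseqA
  rw [beq_iff_eq]
  have := pvFoldA_iff w s 0 (by omega)
  simpa using this

-- ---- B side: the positions dict ----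

-- the ascending index list the dict stores for ch
def pvPosSpec (w : List Char) (ch : Char) : List Int :=
  ((PySem.List.enumerate w).filter (fun p => p.2 == ch)).map (·.1)

theorem pvBuildPos_getD (w : List Char) (ch : Char) :
    (pvBuildPos w).getD ch [] = pvPosSpec w ch := by
  unfold pvBuildPos pvPosSpec
  have hswap : (PySem.List.enumerate w).foldl
        (fun d p => d.modify p.2 [] (fun l => l ++ [p.1])) PySem.Dict.empty
      = ((PySem.List.enumerate w).map Prod.swap).foldl
        (fun d p => d.modify p.1 [] (fun l => l ++ [p.2])) PySem.Dict.empty := by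
    rw [List.foldl_map]
    rfl
  rw [hswap, PySem.Dict.getD_foldl_modify_append]
  simp [List.filter_map, List.map_map, Function.comp_def, Prod.swap]

theorem pvPosSpec_pairwise (w : List Char) (ch : Char) :
    (pvPosSpec w ch).Pairwise (· < ·) := by
  unfold pvPosSpec
  rw [List.pairwise_map]
  exact (PySem.List.pairwise_lt_enumerate w 0).filter _

theorem pvPosSpec_mem (w : List Char) (ch : Char) (x : Int) :
    x ∈ pvPosSpec w ch ↔ ∃ (k : Nat) (h : k < w.length), x = (k : Int) ∧ w[k] = ch := by
  unfold pvPosSpec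
  simp only [List.mem_map, List.mem_filter, PySem.List.mem_enumerate_iff]
  constructor
  · rintro ⟨p, ⟨⟨k, hk, rfl⟩, hch⟩, rfl⟩
    exact ⟨k, hk, by simpa using hch⟩
  · rintro ⟨k, hk, rfl, hch⟩
    exact ⟨((k : Int), w[k]), ⟨⟨k, hk, by simp⟩, by simpa using hch⟩, rfl⟩

-- ---- binary search: least stored index strictly greater than cur ----

-- strictly sorted lists are monotone through getD on in-range indices
theorem pv_sorted_getD_lt (lst : List Int) (hs : lst.Pairwise (· < ·)) {a b : Nat}
    (hab : a < b) (hb : b < lst.length) : lst.getD a 0 < lst.getD b 0 := by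
  rw [List.getD_eq_getElem lst 0 (by omega), List.getD_eq_getElem lst 0 hb]
  exact List.pairwise_iff_getElem.mp hs a b _ _ hab

theorem pv_sorted_getD_le (lst : List Int) (hs : lst.Pairwise (· < ·)) {a b : Nat}
    (hab : a ≤ b) (hb : b < lst.length) : lst.getD a 0 ≤ lst.getD b 0 := by
  rcases Nat.eq_or_lt_of_le hab with rfl | h
  · exact le_refl _
  · exact le_of_lt (pv_sorted_getD_lt lst hs h hb)

theorem pvBisect_spec (lst : List Int) (hs : lst.Pairwise (· < ·)) (cur : Int) :
    ∀ (n lo hi : Nat), hi - lo = n → lo ≤ hi → hi ≤ lst.length →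
    (∀ k, k < lo → lst.getD k 0 ≤ cur) →
    (∀ k, hi ≤ k → k < lst.length → cur < lst.getD k 0) →
    (∀ k, k < pvBisect lst cur lo hi → lst.getD k 0 ≤ cur) ∧
      pvBisect lst cur lo hi ≤ lst.length ∧
      (pvBisect lst cur lo hi < lst.length → cur < lst.getD (pvBisect lst cur lo hi) 0) := by
  intro n
  induction n using Nat.strong_induction_on with
  | _ n ih =>
    intro lo hi hn hlohi hhil hlow hhigh
    by_cases h : lo < hi
    · rw [pvBisect, if_pos h]
      have hmid1 : lo ≤ (lo + hi) / 2 := by omega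
      have hmid2 : (lo + hi) / 2 < hi := by omega
      by_cases hc : cur < lst.getD ((lo + hi) / 2) 0
      · simp only [hc, if_pos]
        refine ih ((lo + hi) / 2 - lo) (by omega) lo _ rfl (by omega) (by omega) hlow ?_
        intro k hk hkl
        rcases Nat.lt_or_ge ((lo + hi) / 2) k with hlt | hge
        · exact lt_trans hc (pv_sorted_getD_lt lst hs hlt hkl)
        · have : k = (lo + hi) / 2 := by omega
          rw [this]; exact hc
      · simp only [hc, if_neg, not_false_iff]
        refine ih (hi - ((lo + hi) / 2 + 1)) (by omega) _ hi rfl (by omega) hhil ?_ hhigh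
        intro k hk
        push Not at hc
        rcases Nat.lt_or_ge k ((lo + hi) / 2) with hlt | hge
        · exact le_of_lt (lt_of_lt_of_le (pv_sorted_getD_lt lst hs hlt (by omega)) hc)
        · have : k = (lo + hi) / 2 := by omega
          rw [this]; exact hc
    · rw [pvBisect, if_neg h]
      have : lo = hi := by omega
      exact ⟨hlow, by omega, fun hl => hhigh lo (by omega) hl⟩

-- ---- the greedy step: skipping a ch-free prefix preserves sublist-ness ----

theorem pv_greedy {c : Char} {s w' : List Char} :
    ∀ pre : List Char, c ∉ pre →
    ((c :: s).Sublist (pre ++ c :: w') ↔ s.Sublist w') := by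
  intro pre
  induction pre with
  | nil => intro _; rw [List.nil_append]; exact List.cons_sublist_cons
  | cons x xs ih =>
    intro hmem
    have hx : c ≠ x := by intro h; exact hmem (by simp [h])
    have := ih (fun h => hmem (List.mem_cons_of_mem _ h))
    rw [List.cons_append, pv_ne_head_sublist hx, this]

-- drop c1 splits at the first occurrence j of ch at or after c1
theorem pv_drop_decomp (w : List Char) (c1 j : Nat) (hj : j < w.length) (hcj : c1 ≤ j) :
    w.drop c1 = (w.drop c1).take (j - c1) ++ w[j] :: w.drop (j + 1) := by
  conv_lhs => rw [← List.take_append_drop (j - c1) (w.drop c1)]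
  rw [List.drop_drop, show c1 + (j - c1) = j from by omega, List.drop_eq_getElem_cons hj]

theorem pv_mem_take_drop {w : List Char} {c1 j : Nat} {x : Char}
    (hx : x ∈ (w.drop c1).take (j - c1)) :
    ∃ k, c1 ≤ k ∧ k < j ∧ k < w.length ∧ w[k]? = some x := by
  obtain ⟨m, hm, hget⟩ := List.mem_iff_getElem.mp hx
  have hm1 : m < j - c1 := by
    have := hm; simp [List.length_take] at this; omega
  have hm2 : c1 + m < w.length := by
    have := hm; simp [List.length_take, List.length_drop] at this; omega
  refine ⟨c1 + m, by omega, by omega, hm2, ?_⟩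
  rw [List.getElem?_eq_getElem hm2]
  have h1 : ((w.drop c1).take (j - c1))[m] = w[c1 + m]'(hm2) := by
    rw [List.getElem_take, List.getElem_drop]
  rw [← hget, h1]

-- ---- matches(cand) tests sublist-ness of the word suffix after the cursor ----

theorem pvMatchesB_iff (w : List Char) : ∀ (s : List Char) (cur : Int), -1 ≤ cur →
    (pvMatchesB (pvBuildPos w) s cur = true ↔ s.Sublist (w.drop (cur + 1).toNat)) := by
  intro s
  induction s with
  | nil => intro cur _; simp [pvMatchesB]
  | cons ch rest ih =>
    intro cur hcur
    have hc1 : (((cur + 1).toNat : Nat) : Int) = cur + 1 := Int.toNat_of_nonneg (by omega)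
    rw [show pvMatchesB (pvBuildPos w) (ch :: rest) cur
        = (if pvBisect (pvPosSpec w ch) cur 0 (pvPosSpec w ch).length = (pvPosSpec w ch).length
           then false
           else pvMatchesB (pvBuildPos w) rest
             ((pvPosSpec w ch).getD (pvBisect (pvPosSpec w ch) cur 0 (pvPosSpec w ch).length) 0))
       from by simp only [pvMatchesB, pvBuildPos_getD]]
    set c1 := (cur + 1).toNat with hc1def
    set lst := pvPosSpec w ch with hlst
    have hsorted : lst.Pairwise (· < ·) := pvPosSpec_pairwise w ch
    obtain ⟨hlow, hle, hhit⟩ := pvBisect_spec lst hsorted cur lst.length 0 lst.length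
      (by omega) (by omega) (by omega) (by omega) (by omega)
    set r := pvBisect lst cur 0 lst.length with hr
    rcases Nat.eq_or_lt_of_le hle with heq | hltlen
    · -- lo == len(lst): no stored index of ch beyond cur; ch ∉ drop, both sides false
      rw [if_pos heq]
      have hnotmem : ch ∉ w.drop c1 := by
        intro hmem
        obtain ⟨m, hm, hget⟩ := List.mem_iff_getElem.mp hmem
        have hm2 : c1 + m < w.length := by
          have := hm; simp only [List.length_drop] at this; omega
        have hx : ((c1 + m : Nat) : Int) ∈ lst := by
          rw [hlst, pvPosSpec_mem]
          exact ⟨c1 + m, hm2, rfl, by rw [← hget, List.getElem_drop]⟩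
        obtain ⟨k, hk, hgetk⟩ := List.mem_iff_getElem.mp hx
        have hlk := hlow k (by omega)
        rw [List.getD_eq_getElem lst 0 hk, hgetk] at hlk
        have : (c1 : Int) + m ≤ cur := by push_cast at hlk ⊢; omega
        omega
      exact iff_of_false (by simp) (fun hsub => hnotmem (hsub.subset (by simp)))
    · -- found: lst[r] is the least stored index strictly greater than cur
      rw [if_neg (by omega)]
      have hgetr : lst.getD r 0 = lst[r] := List.getD_eq_getElem lst 0 hltlen
      have hmemr : lst[r] ∈ pvPosSpec w ch := List.getElem_mem _
      obtain ⟨j, hjw, hjval, hjch⟩ := (pvPosSpec_mem w ch _).mp hmemr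
      have hjval' : lst.getD r 0 = (j : Int) := by rw [hgetr]; exact hjval
      have hjgt : cur < (j : Int) := by
        have := hhit hltlen
        rw [hjval'] at this; exact this
      have hjc1 : c1 ≤ j := by omega
      -- minimality: no occurrence of ch in [c1, j)
      have hmin : ∀ k, c1 ≤ k → k < j → k < w.length → w[k]? ≠ some ch := by
        intro k hk1 hk2 hk3 hkch
        have hx : ((k : Nat) : Int) ∈ lst := by
          rw [hlst, pvPosSpec_mem]
          refine ⟨k, hk3, rfl, ?_⟩
          rw [List.getElem?_eq_getElem hk3] at hkch
          exact Option.some_inj.mp hkch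
        obtain ⟨m, hm, hgetm⟩ := List.mem_iff_getElem.mp hx
        have hgetm' : lst.getD m 0 = (k : Int) := by
          rw [List.getD_eq_getElem lst 0 hm, hgetm]
        rcases Nat.lt_or_ge m r with hmr | hmr
        · have := hlow m hmr
          rw [hgetm'] at this
          omega
        · have hge : lst.getD r 0 ≤ lst.getD m 0 := pv_sorted_getD_le lst hsorted hmr hm
          rw [hgetm', hjval'] at hge
          omega
      -- decompose the suffix and apply the greedy lemma
      have hdecomp := pv_drop_decomp w c1 j hjw hjc1
      have hnotpre : ch ∉ (w.drop c1).take (j - c1) := by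
        intro hmem
        obtain ⟨k, h1, h2, h3, h4⟩ := pv_mem_take_drop hmem
        exact hmin k h1 h2 h3 h4
      have hrec := ih (lst.getD r 0) (by rw [hjval']; omega)
      have hcur' : ((lst.getD r 0 + 1).toNat) = j + 1 := by
        rw [hjval']; omega
      rw [hrec, hcur', hdecomp, hjch, pv_greedy _ hnotpre]

-- the two subsequence tests agree (cursor -1 = the whole word)
theorem pvTests_agree (w s : List Char) :
    pvIsSubseqA s w = pvMatchesB (pvBuildPos w) s (-1) := by
  rw [Bool.eq_iff_iff, pvIsSubseqA_iff, pvMatchesB_iff w s (-1) (by omega)]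
  norm_num

-- ===== VERDICT (by name: the statement is the Claim_ definition above) =====
theorem find_longest_subsequence_spec : Claim_equal_find_longest_subsequence := by
  intro word word_set _
  unfold Spec_find_longest_subsequence find_longest_subsequence find_longest_subsequence_alt
  apply PySem.List.foldl_congr_mem
  intro acc x _
  rw [pvTests_agree word.toList x.toList]
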